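-- pv_equiv track=rewrite | github.com/ayushashr/Punnett-Square-Calculator | main.py | get_gene_combinations
-- ===== SOURCE A (Python) =====
-- def get_gene_combinations(parent):
--     '''
--     Takes in a list of the parents traits and alleles
--     Returns all the possible gametes of a parent based on their alleles.
--     Returns as a list in order to be used in future functions
--     '''
--
--     if len(parent) == 1: #If a parent only has one trait
--         return [parent[0][0], parent[0][1]]
--     else:
--         combos = [""] # Initialize combinations list with an empty string for the first iteration.
--
--         # Loop through each trait of the parent gene (e.g., ['Aa', 'Bb']).
--         for gene in parent:
--             # Temporary list to store combinations for the current gene.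
--             temp = []
--
--             # Loop through each existing combination in the result.
--             for start_allele in combos:
--                 # After 1st iteration, combos will become the first trait (Ex 'AaBb's first will be 'Aa')
--                 # Loop through each allele in the current gene other than the start allele (Ex 'B' and 'b')
--                 for allele in gene:
--                 # Concatenate the alleles by appending them to the start allele.
--                 # (Ex. A+B+C, a+B+c, A+B+c, A+b+C, A+b+c and a+B+C, a+B+c, a+b+C, a+b+c )
--                     temp.append(start_allele + allele)
--              # Concatenate the alleles by appending them to the start allele.
--              # This generates all possible gamete combinations for the current gene.
--             combos = temp
--         return combos
-- ===== SOURCE B (Python) =====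
-- def get_gene_combinations(parent):
--     if len(parent) == 1:  # single-trait parent: the two alleles of its one gene
--         return [parent[0][0], parent[0][1]]
--
--     def product(genes):
--         if not genes:
--             return [""]
--         rest = product(genes[1:])
--         return [allele + tail for allele in genes[0] for tail in rest]
--
--     return product(parent)
-- ===== Notes on version B (the rewrite author's own statement) =====
-- stated objective: alternative
-- what changed: Replaces A's iterative rebuild-the-whole-list accumulation (combos/temp with three nested loops) by a recursive Cartesian-product helper that recurses on the tail of the gene list and prepends each allele of the head gene via a comprehension.
import Mathlib
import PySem

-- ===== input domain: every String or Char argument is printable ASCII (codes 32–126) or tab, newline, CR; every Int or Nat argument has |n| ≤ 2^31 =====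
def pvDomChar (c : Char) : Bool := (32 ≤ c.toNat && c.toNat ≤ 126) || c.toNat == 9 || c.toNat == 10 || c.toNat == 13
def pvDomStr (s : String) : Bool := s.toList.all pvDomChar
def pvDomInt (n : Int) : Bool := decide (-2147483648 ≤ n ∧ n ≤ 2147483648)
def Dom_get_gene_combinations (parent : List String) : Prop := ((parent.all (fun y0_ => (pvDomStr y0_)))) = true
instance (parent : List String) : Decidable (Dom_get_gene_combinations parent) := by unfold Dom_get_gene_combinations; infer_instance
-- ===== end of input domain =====

-- B replaces A's iterative rebuild-the-list accumulation by a recursive Cartesian product (alternative decomposition, same cost).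

-- ===== PORT A =====
-- strings are handled on the List Char side (String.toList / String.ofList), exact for ASCII and all chars
def get_gene_combinations (parent : List String) : List String :=
  if parent.length = 1 then
    -- [parent[0][0], parent[0][1]]; IndexError (gene shorter than 2) is outside Pre_
    match PySem.Str.pyGet? ((parent.getD 0 "")) 0, PySem.Str.pyGet? ((parent.getD 0 "")) 1 with
    | some a, some b => [a.toString, b.toString]
    | _, _ => []
  else
    -- combos = [""]; for gene in parent: temp=[]; for start in combos: for allele in gene: temp.append(start+allele); combos=temp
    (parent.foldl
      (fun (combos : List (List Char)) (gene : String) =>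
        combos.foldl
          (fun (temp : List (List Char)) (start : List Char) =>
            gene.toList.foldl (fun (temp : List (List Char)) (allele : Char) => temp ++ [start ++ [allele]]) temp)
          [])
      [[]]).map String.ofList

-- ===== PORT B =====
-- def product(genes): if not genes: return ['']; rest = product(genes[1:]); return [a + r for a in genes[0] for r in rest]
def pvProductB : List String → List (List Char)
  | [] => [[]]
  | g :: gs =>
    let rest := pvProductB gs
    g.toList.flatMap (fun a => rest.map (fun r => a :: r))

def get_gene_combinations_alt (parent : List String) : List String :=
  if parent.length = 1 then
    -- same top-level guard as the Python B: [parent[0][0], parent[0][1]]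
    ((PySem.Str.pyGet? ((parent.getD 0 "")) 0).bind (fun a =>
      (PySem.Str.pyGet? ((parent.getD 0 "")) 1).map (fun b => [a.toString, b.toString]))).getD []
  else
    (pvProductB parent).map String.ofList

-- ===== PRECONDITION & SPEC =====
-- Pre_ excludes only the inputs on which A raises IndexError: a single-gene parent whose gene has fewer than 2 characters.
def Pre_get_gene_combinations (parent : List String) : Prop :=
  parent.length = 1 → 2 ≤ (parent.getD 0 "").toList.length
instance (parent : List String) : Decidable (Pre_get_gene_combinations parent) := by
  unfold Pre_get_gene_combinations; infer_instance

def pvWitness_get_gene_combinations : List String := ["Aa", "Bb"]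

def Spec_get_gene_combinations (parent : List String) (out : List String) : Prop := out = get_gene_combinations_alt parent
instance (parent : List String) (out : List String) : Decidable (Spec_get_gene_combinations parent out) := by unfold Spec_get_gene_combinations; infer_instance

-- ===== CLAIM (what is proved, stated in full; the proofs are below) =====
def Claim_equal_get_gene_combinations : Prop := ∀ (parent : List String), Dom_get_gene_combinations parent → Pre_get_gene_combinations parent → Spec_get_gene_combinations parent (get_gene_combinations parent)

-- ===== LEMMAS AND PROOFS =====

-- one pass of A's innermost loop over the allele chars of a gene
theorem pvA_inner1 (s : List Char) (cs : List Char) (acc : List (List Char)) :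
    cs.foldl (fun temp allele => temp ++ [s ++ [allele]]) acc
    = acc ++ cs.map (fun allele => s ++ [allele]) := by
  induction cs generalizing acc with
  | nil => simp
  | cons c cc ih => simp [ih]

-- the inner two loops of A append, for each start, start ++ [allele] for every allele of gene
theorem pvA_inner (cs : List Char) (combos acc : List (List Char)) :
    combos.foldl
      (fun temp start => cs.foldl (fun temp allele => temp ++ [start ++ [allele]]) temp) acc
    = acc ++ combos.flatMap (fun start => cs.map (fun allele => start ++ [allele])) := by
  induction combos generalizing acc with
  | nil => simp
  | cons s ss ih =>
    rw [List.foldl_cons, pvA_inner1, ih, List.flatMap_cons, List.append_assoc]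

-- per start string: processing the remaining genes after the head gene commutes with prefixing
theorem pvPerStart (start : List Char) (cs : List Char) (rest : List (List Char)) :
    (cs.map (fun a => start ++ [a])).flatMap (fun s2 => rest.map (fun r => s2 ++ r))
    = (cs.flatMap (fun a => rest.map (fun r => a :: r))).map (fun r => start ++ r) := by
  induction cs with
  | nil => simp
  | cons c cc ih => simp [ih, List.map_map, Function.comp]

-- A's whole else-branch loop equals the recursive product with every result prefixed by the accumulator entries
theorem pvA_loop (parent : List String) (combos : List (List Char)) :
    parent.foldl
      (fun combos gene =>
        combos.foldl
          (fun temp start => gene.toList.foldl (fun temp allele => temp ++ [start ++ [allele]]) temp) [])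
      combos
    = combos.flatMap (fun start => (pvProductB parent).map (fun r => start ++ r)) := by
  induction parent generalizing combos with
  | nil => simp [pvProductB]
  | cons g gs ih =>
    simp only [List.foldl_cons]
    rw [pvA_inner, ih, List.nil_append, List.flatMap_assoc]
    simp only [pvProductB]
    congr 1
    funext start
    exact pvPerStart start g.toList (pvProductB gs)

-- ===== VERDICT (by name: the statement is the Claim_ definition above) =====
theorem get_gene_combinations_spec : Claim_equal_get_gene_combinations := by
  intro parent _ _
  unfold Spec_get_gene_combinations get_gene_combinations get_gene_combinations_alt
  by_cases h : parent.length = 1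
  · simp only [h, if_pos]
    rcases PySem.Str.pyGet? ((parent.getD 0 "")) 0 with _ | a <;>
      rcases PySem.Str.pyGet? ((parent.getD 0 "")) 1 with _ | b <;>
        simp
  · simp only [h, if_false]
    rw [pvA_loop]
    simp
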